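-- pv_equiv track=rewrite | github.com/k30035600/younsu | tools/build_commission_evidence_json.py | _gab1_hits_to_rels_labels
-- ===== SOURCE A (Python) =====
-- def _gab1_hits_to_rels_labels(hits: list[tuple[int, str]]) -> tuple[list[str], list[str]] | None:
--     if not hits:
--         return None
--     hits.sort(key=lambda x: (x[0], x[1]))
--     seen: set[int] = set()
--     rels: list[str] = []
--     labels: list[str] = []
--     for n, rel in hits:
--         if n in seen:
--             continue
--         seen.add(n)
--         rels.append(rel)
--         labels.append(f"갑 제1-{n}호증")
--     return rels, labels
-- ===== SOURCE B (Python) =====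
-- # Alternative: after the in-place lexicographic sort, duplicates of each number are
-- # adjacent, so dedup by skipping the run of equal numbers instead of a seen-set.
-- # (Like A, this sorts `hits` in place; return-value equivalence is what is proved.)
-- def _gab1_hits_to_rels_labels(hits):
--     if not hits:
--         return None
--     hits.sort(key=lambda x: (x[0], x[1]))
--     rels, labels = [], []
--     i, m = 0, len(hits)
--     while i < m:
--         n, rel = hits[i]
--         rels.append(rel)
--         labels.append(f"갑 제1-{n}호증")
--         while i < m and hits[i][0] == n:
--             i += 1
--     return rels, labels
-- ===== Notes on version B (the rewrite author's own statement) =====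
-- stated objective: alternative
-- what changed: Replaces the seen-set membership loop with a run-skipping scan that exploits adjacency of equal numbers after the sort (no auxiliary set is maintained).
import Mathlib
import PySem

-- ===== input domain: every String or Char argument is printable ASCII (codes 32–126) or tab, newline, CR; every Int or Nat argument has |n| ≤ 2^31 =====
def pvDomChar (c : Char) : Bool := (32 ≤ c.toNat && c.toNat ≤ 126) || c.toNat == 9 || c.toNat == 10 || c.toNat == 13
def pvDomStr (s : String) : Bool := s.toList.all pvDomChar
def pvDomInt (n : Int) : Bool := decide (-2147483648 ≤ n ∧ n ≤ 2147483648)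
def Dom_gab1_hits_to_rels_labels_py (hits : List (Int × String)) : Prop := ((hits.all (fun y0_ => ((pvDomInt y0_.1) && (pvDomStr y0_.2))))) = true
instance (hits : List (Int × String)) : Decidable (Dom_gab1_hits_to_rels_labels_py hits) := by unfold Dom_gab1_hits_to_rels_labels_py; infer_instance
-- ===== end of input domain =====

-- B replaces A's seen-set dedup loop with a run-skipping scan over the sorted list
-- (both sort `hits`; like A, the Python B sorts its argument in place — the proved
-- equivalence is about the return value).


-- the f-string label f"갑 제1-{n}호증"
def pvLabel (n : Int) : String := "갑 제1-" ++ PySem.Int.toStr n ++ "호증"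

-- ===== PORT A =====
-- one iteration of A's for-loop: state is (seen, rels, labels)
def pvStepA (acc : PySem.Set Int × List String × List String) (p : Int × String) :
    PySem.Set Int × List String × List String :=
  if PySem.Set.contains acc.1 p.1 then acc
  else (PySem.Set.add acc.1 p.1, acc.2.1 ++ [p.2], acc.2.2 ++ [pvLabel p.1])

def gab1_hits_to_rels_labels_py (hits : List (Int × String)) : Option (List String × List String) :=
  if hits = [] then none
  else
    let sortedHits := PySem.List.sorted2 hits (fun x => x.1) (fun x => x.2)
    let st := sortedHits.foldl pvStepA (PySem.Set.empty, [], [])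
    some (st.2.1, st.2.2)

-- ===== PORT B =====
-- B's while-loop: emit the head of each run, then skip the run of equal numbers
def pvGroupGo : List (Int × String) → List String × List String
  | [] => ([], [])
  | (n, rel) :: rest =>
    let rest' := rest.dropWhile (fun q => q.1 == n)
    let pr := pvGroupGo rest'
    (rel :: pr.1, pvLabel n :: pr.2)
termination_by l => l.length
decreasing_by
  simp only [List.length_cons]
  exact Nat.lt_succ_of_le (List.length_dropWhile_le _ _)

def gab1_hits_to_rels_labels_py_alt (hits : List (Int × String)) : Option (List String × List String) :=
  if hits = [] then none
  else some (pvGroupGo (PySem.List.sorted2 hits (fun x => x.1) (fun x => x.2)))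

-- ===== PRECONDITION & SPEC =====
def Spec_gab1_hits_to_rels_labels_py (hits : List (Int × String)) (out : Option (List String × List String)) : Prop := out = gab1_hits_to_rels_labels_py_alt hits
instance (hits : List (Int × String)) (out : Option (List String × List String)) : Decidable (Spec_gab1_hits_to_rels_labels_py hits out) := by unfold Spec_gab1_hits_to_rels_labels_py; infer_instance

-- ===== CLAIM (what is proved, stated in full; the proofs are below) =====
def Claim_equal_gab1_hits_to_rels_labels_py : Prop := ∀ (hits : List (Int × String)), Dom_gab1_hits_to_rels_labels_py hits → Spec_gab1_hits_to_rels_labels_py hits (gab1_hits_to_rels_labels_py hits)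

-- ===== LEMMAS AND PROOFS =====

-- the comparison sorted2 uses for key (x.1, x.2), reverse = false
def pvBefore (a b : Int × String) : Bool :=
  decide (a.1 < b.1) || (!decide (b.1 < a.1) && decide (a.2 < b.2))

lemma pvBefore_iff (a b : Int × String) :
    pvBefore a b = true ↔ (a.1 < b.1 ∨ (a.1 = b.1 ∧ a.2 < b.2)) := by
  simp only [pvBefore, Bool.or_eq_true, Bool.and_eq_true, Bool.not_eq_true',
    decide_eq_true_eq, decide_eq_false_iff_not]
  constructor
  · rintro (h | ⟨h, h'⟩)
    · exact Or.inl h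
    · rcases lt_or_eq_of_le (not_lt.mp h) with h2 | h2
      · exact Or.inl h2
      · exact Or.inr ⟨h2, h'⟩
  · rintro (h | ⟨h, h'⟩)
    · exact Or.inl h
    · exact Or.inr ⟨by omega, h'⟩

lemma pvBefore_asymm {a b : Int × String} (h : pvBefore a b = true) : pvBefore b a = false := by
  rw [Bool.eq_false_iff, Ne, pvBefore_iff] at *
  rcases h with h | ⟨h, h'⟩
  · rintro (h2 | ⟨h2, _⟩) <;> omega
  · rintro (h2 | ⟨_, h2'⟩)
    · omega
    · exact absurd h' (lt_asymm h2')

lemma pvBefore_trans {a b c : Int × String} (h1 : pvBefore a b = true)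
    (h2 : pvBefore b c = true) : pvBefore a c = true := by
  rw [pvBefore_iff] at *
  rcases h1 with h1 | ⟨h1, h1'⟩ <;> rcases h2 with h2 | ⟨h2, h2'⟩
  · exact Or.inl (h1.trans h2)
  · exact Or.inl (by omega)
  · exact Or.inl (by omega)
  · exact Or.inr ⟨by omega, h1'.trans h2'⟩

lemma pvInsert_pairwise (x : Int × String) (ys : List (Int × String))
    (h : ys.Pairwise (fun a b => pvBefore b a = false)) :
    (PySem.List.insertBy pvBefore x ys).Pairwise (fun a b => pvBefore b a = false) := by
  induction ys with
  | nil => simp [PySem.List.insertBy]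
  | cons y ys ih =>
    rw [List.pairwise_cons] at h
    by_cases hb : pvBefore x y = true
    · show List.Pairwise _ (if pvBefore x y then _ else _)
      rw [if_pos hb]
      refine List.pairwise_cons.mpr ⟨?_, List.pairwise_cons.mpr ⟨h.1, h.2⟩⟩
      intro z hz
      rcases hz with _ | hz
      · exact pvBefore_asymm hb
      · rename_i hz
        have hyz := h.1 _ hz
        rw [Bool.eq_false_iff] at hyz ⊢
        intro hzx
        exact hyz (pvBefore_trans hzx hb)
    · show List.Pairwise _ (if pvBefore x y then _ else _)
      rw [if_neg hb]
      refine List.pairwise_cons.mpr ⟨?_, ih h.2⟩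
      intro z hz
      rcases (PySem.List.insertBy_mem_iff pvBefore x z ys).mp hz with rfl | hz
      · exact Bool.eq_false_iff.mpr hb
      · exact h.1 _ hz

lemma pvSorted2_pairwise (xs : List (Int × String)) :
    (PySem.List.sorted2 xs (fun x => x.1) (fun x => x.2) false).Pairwise
      (fun a b => pvBefore b a = false) := by
  have hrw : PySem.List.sorted2 xs (fun x => x.1) (fun x => x.2) false =
      xs.foldl (fun acc x => PySem.List.insertBy pvBefore x acc) [] := rfl
  rw [hrw]
  have key : ∀ (l : List (Int × String)) (acc : List (Int × String)),
      acc.Pairwise (fun a b => pvBefore b a = false) →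
      (l.foldl (fun acc x => PySem.List.insertBy pvBefore x acc) acc).Pairwise
        (fun a b => pvBefore b a = false) := by
    intro l
    induction l with
    | nil => intro acc h; exact h
    | cons x l ih => intro acc h; exact ih _ (pvInsert_pairwise x acc h)
  exact key xs [] List.Pairwise.nil

lemma pvSorted2_fst_mono (xs : List (Int × String)) :
    (PySem.List.sorted2 xs (fun x => x.1) (fun x => x.2) false).Pairwise
      (fun a b => a.1 ≤ b.1) := by
  refine (pvSorted2_pairwise xs).imp ?_
  intro a b h
  rw [Bool.eq_false_iff, Ne, pvBefore_iff] at h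
  by_contra hc
  exact h (Or.inl (by omega))

lemma pvGroupGo_cons (n : Int) (rel : String) (rest : List (Int × String)) :
    pvGroupGo ((n, rel) :: rest) =
      (rel :: (pvGroupGo (rest.dropWhile (fun q => q.1 == n))).1,
       pvLabel n :: (pvGroupGo (rest.dropWhile (fun q => q.1 == n))).2) := by
  rw [pvGroupGo]

-- once a number is in seen, A's loop skips the whole run of that number
lemma pvSkipRun (rest : List (Int × String)) :
    ∀ (seen : PySem.Set Int) (rels labels : List String) (n : Int), n ∈ seen →
    rest.foldl pvStepA (seen, rels, labels) =
      (rest.dropWhile (fun q => q.1 == n)).foldl pvStepA (seen, rels, labels) := by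
  induction rest with
  | nil => intro seen rels labels n _; rfl
  | cons y rest ih =>
    intro seen rels labels n hn
    by_cases hy : y.1 = n
    · rw [List.dropWhile_cons_of_pos (by simp [hy])]
      have hstep : pvStepA (seen, rels, labels) y = (seen, rels, labels) := by
        simp [pvStepA, PySem.Set.contains, hy, hn]
      rw [List.foldl_cons, hstep]
      exact ih seen rels labels n hn
    · rw [List.dropWhile_cons_of_neg (by simp [hy])]

lemma pvDrop_gt (rest : List (Int × String)) (n : Int)
    (hpw : rest.Pairwise (fun a b => a.1 ≤ b.1))
    (hge : ∀ x ∈ rest, n ≤ x.1) :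
    ∀ x ∈ rest.dropWhile (fun q => q.1 == n), n < x.1 := by
  induction rest with
  | nil => intro x hx; simp at hx
  | cons y rest ih =>
    rw [List.pairwise_cons] at hpw
    by_cases hy : y.1 = n
    · rw [List.dropWhile_cons_of_pos (by simp [hy])]
      exact ih hpw.2 (fun x hx => hge x (List.mem_cons_of_mem _ hx))
    · rw [List.dropWhile_cons_of_neg (by simp [hy])]
      intro x hx
      have hny : n < y.1 := lt_of_le_of_ne (hge y List.mem_cons_self) (Ne.symm hy)
      rcases hx with _ | hx
      · exact hny
      · rename_i hx
        exact lt_of_lt_of_le hny (hpw.1 x hx)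

-- the core invariant: on a list whose numbers are nondecreasing and all unseen,
-- A's seen-set loop produces exactly B's run-skipping output, appended
lemma pvMain : ∀ (k : Nat) (l : List (Int × String)), l.length ≤ k →
    l.Pairwise (fun a b => a.1 ≤ b.1) →
    ∀ (seen : PySem.Set Int) (rels labels : List String),
    (∀ x ∈ l, x.1 ∉ seen) →
    (l.foldl pvStepA (seen, rels, labels)).2 =
      (rels ++ (pvGroupGo l).1, labels ++ (pvGroupGo l).2) := by
  intro k
  induction k with
  | zero =>
    intro l hl _ seen rels labels _
    have : l = [] := List.eq_nil_of_length_eq_zero (Nat.le_zero.mp hl)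
    subst this
    simp [pvGroupGo]
  | succ k ih =>
    intro l hl hpw seen rels labels hseen
    cases l with
    | nil => simp [pvGroupGo]
    | cons p rest =>
      obtain ⟨n, rel⟩ := p
      rw [List.pairwise_cons] at hpw
      have hn : n ∉ seen := hseen _ List.mem_cons_self
      have hstep : pvStepA (seen, rels, labels) (n, rel) =
          (PySem.Set.add seen n, rels ++ [rel], labels ++ [pvLabel n]) := by
        simp [pvStepA, PySem.Set.contains, hn]
      rw [List.foldl_cons, hstep,
        pvSkipRun rest _ _ _ n (by simp [PySem.Set.mem_add])]
      set rest' := rest.dropWhile (fun q => q.1 == n) with hrest'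
      have hsub : List.Sublist rest' rest := List.dropWhile_sublist _
      have hlen : rest'.length ≤ k := by
        have h1 := hsub.length_le
        simp only [List.length_cons] at hl
        omega
      have hpw' : rest'.Pairwise (fun a b => a.1 ≤ b.1) := hpw.2.sublist hsub
      have hgt : ∀ x ∈ rest', n < x.1 :=
        pvDrop_gt rest n hpw.2 (fun x hx => hpw.1 x hx)
      have hseen' : ∀ x ∈ rest', x.1 ∉ PySem.Set.add seen n := by
        intro x hx
        rw [PySem.Set.mem_add]
        rintro (h | h)
        · exact hseen x (List.mem_cons_of_mem _ (hsub.subset hx)) h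
        · have := hgt x hx; omega
      rw [ih rest' hlen hpw' _ _ _ hseen', pvGroupGo_cons]
      simp [hrest']

-- ===== VERDICT (by name: the statement is the Claim_ definition above) =====
theorem gab1_hits_to_rels_labels_py_spec : Claim_equal_gab1_hits_to_rels_labels_py := by
  intro hits _
  unfold Spec_gab1_hits_to_rels_labels_py gab1_hits_to_rels_labels_py gab1_hits_to_rels_labels_py_alt
  by_cases h : hits = []
  · simp [h]
  · rw [if_neg h, if_neg h]
    set s := PySem.List.sorted2 hits (fun x => x.1) (fun x => x.2) false with hs
    have hmain := pvMain s.length s (le_refl _) (pvSorted2_fst_mono hits)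
      PySem.Set.empty [] [] (by intro x _ hx; exact (List.not_mem_nil hx))
    simp only [List.nil_append] at hmain
    show some ((s.foldl pvStepA (PySem.Set.empty, [], [])).2.1,
               (s.foldl pvStepA (PySem.Set.empty, [], [])).2.2) = some (pvGroupGo s)
    rw [show ((s.foldl pvStepA (PySem.Set.empty, [], [])).2.1,
             (s.foldl pvStepA (PySem.Set.empty, [], [])).2.2) =
          (s.foldl pvStepA (PySem.Set.empty, [], [])).2 from rfl, hmain]
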